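-- pv_equiv track=rewrite | github.com/bhatt40/advent-of-code | 2019/day-12/day-12.py | step_single_axis
-- ===== SOURCE A (Python) =====
-- def step_single_axis(positions, velocities):
--     gravity = [
--         [
--             1 if other_position > position else -1 if other_position < position else 0 for other_position in positions
--         ] for position in positions
--     ]
--
--     velocities = [
--         velocity + sum(gravity[index])
--         for index, velocity in enumerate(velocities)
--     ]
--
--     positions = [
--         position + velocities[index]
--         for index, position in enumerate(positions)
--     ]
--
--     return positions, velocities
-- ===== SOURCE B (Python) =====
-- def step_single_axis(positions, velocities):
--     # One sorted pass: for each value, first[x] = #elements < x, last[x] = #elements <= x,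
--     # so gravity pull on x is (n - last[x]) - first[x].
--     n = len(positions)
--     first = {}
--     last = {}
--     for i, x in enumerate(sorted(positions)):
--         if x not in first:
--             first[x] = i
--         last[x] = i + 1
--     new_velocities = [v + (n - last[p]) - first[p] for p, v in zip(positions, velocities)]
--     new_positions = [p + v for p, v in zip(positions, new_velocities)]
--     return new_positions, new_velocities
-- ===== Notes on version B (the rewrite author's own statement) =====
-- stated objective: faster
-- what changed: Replaces the O(n^2) all-pairs gravity matrix with one sort plus one pass that records, per position value, the count of strictly smaller and of less-or-equal elements in two dicts, so each gravity pull is (n - last[p]) - first[p] looked up in O(1).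
import Mathlib
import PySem

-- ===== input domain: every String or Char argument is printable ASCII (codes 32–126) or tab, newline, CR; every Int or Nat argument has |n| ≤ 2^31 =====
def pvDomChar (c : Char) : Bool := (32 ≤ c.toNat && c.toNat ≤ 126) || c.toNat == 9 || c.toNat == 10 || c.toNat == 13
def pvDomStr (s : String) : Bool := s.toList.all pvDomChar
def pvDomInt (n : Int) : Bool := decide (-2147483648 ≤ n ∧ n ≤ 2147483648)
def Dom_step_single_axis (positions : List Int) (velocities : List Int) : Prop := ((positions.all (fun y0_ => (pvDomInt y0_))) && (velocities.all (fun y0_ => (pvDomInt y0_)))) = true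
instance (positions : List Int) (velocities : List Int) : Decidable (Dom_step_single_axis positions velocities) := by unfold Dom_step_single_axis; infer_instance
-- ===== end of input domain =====

-- B replaces A's O(n^2) all-pairs gravity table by one sort plus a single pass building
-- per-value "first index" / "one past last index" dicts (gravity = (n - last[p]) - first[p]).


-- ===== PORT A =====
-- Literal port of A. The indexings gravity[index] / velocities[index] are in range on every
-- input admitted by Pre_ (equal lengths), so the .getD defaults only make them total.
def step_single_axis (positions : List Int) (velocities : List Int) : List Int × List Int :=
  let gravity : List (List Int) := positions.map (fun position =>
    positions.map (fun other_position =>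
      if other_position > position then (1 : Int)
      else if other_position < position then (-1 : Int) else 0))
  let velocities' : List Int := (PySem.List.enumerate velocities).map (fun iv =>
    iv.2 + ((PySem.List.pyGet? gravity iv.1).getD []).sum)
  let positions' : List Int := (PySem.List.enumerate positions).map (fun ip =>
    ip.2 + (PySem.List.pyGet? velocities' ip.1).getD 0)
  (positions', velocities')

-- ===== PORT B =====
-- loop body of Source B's single pass over enumerate(sorted(positions))
def flStep (acc : PySem.Dict Int Int × PySem.Dict Int Int) (ix : Int × Int) :
    PySem.Dict Int Int × PySem.Dict Int Int :=
  ((if acc.1.contains ix.2 then acc.1 else acc.1.insert ix.2 ix.1),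
   acc.2.insert ix.2 (ix.1 + 1))

-- Source B's for-loop: (first, last) after the pass over enumerate(sorted(positions))
def flFold (positions : List Int) : PySem.Dict Int Int × PySem.Dict Int Int :=
  (PySem.List.enumerate (PySem.List.sorted positions (fun x => x) false)).foldl
    flStep (PySem.Dict.empty, PySem.Dict.empty)

-- Literal port of B (Source B). first[p] / last[p] are always present for p ∈ positions, so the
-- .getD defaults only make the dict [] accesses total.
def step_single_axis_alt (positions : List Int) (velocities : List Int) : List Int × List Int :=
  let n : Int := positions.length
  let fl := flFold positions
  let new_velocities : List Int := (positions.zip velocities).map (fun pv =>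
    pv.2 + (n - fl.2.getD pv.1 0) - fl.1.getD pv.1 0)
  let new_positions : List Int := (positions.zip new_velocities).map (fun pv => pv.1 + pv.2)
  (new_positions, new_velocities)

-- ===== PRECONDITION & SPEC =====
-- A raises IndexError whenever the two lists have different lengths; Pre_ excludes exactly those.
def Pre_step_single_axis (positions : List Int) (velocities : List Int) : Prop :=
  positions.length = velocities.length
instance (positions : List Int) (velocities : List Int) : Decidable (Pre_step_single_axis positions velocities) := by unfold Pre_step_single_axis; infer_instance

def pvWitness_step_single_axis : List Int × List Int := ([3, 5, 3], [1, -2, 0])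

def Spec_step_single_axis (positions : List Int) (velocities : List Int) (out : List Int × List Int) : Prop := out = step_single_axis_alt positions velocities
instance (positions : List Int) (velocities : List Int) (out : List Int × List Int) : Decidable (Spec_step_single_axis positions velocities out) := by unfold Spec_step_single_axis; infer_instance

-- ===== CLAIM (what is proved, stated in full; the proofs are below) =====
def Claim_equal_step_single_axis : Prop := ∀ (positions : List Int) (velocities : List Int), Dom_step_single_axis positions velocities → Pre_step_single_axis positions velocities → Spec_step_single_axis positions velocities (step_single_axis positions velocities)

-- ===== LEMMAS AND PROOFS =====

-- A's row sum for a fixed position p is (#greater) − (#less).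
lemma row_sum (p : Int) (xs : List Int) :
    (xs.map (fun q => if q > p then (1 : Int) else if q < p then (-1 : Int) else 0)).sum
      = (xs.countP (fun q => p < q) : Int) - (xs.countP (fun q => q < p) : Int) := by
  induction xs with
  | nil => simp
  | cons x t ih =>
    simp only [List.map_cons, List.sum_cons, List.countP_cons, ih]
    by_cases h1 : p < x
    · simp only [gt_iff_lt, if_pos h1, decide_eq_true_eq, if_pos trivial]
      simp [h1, not_lt.mpr (le_of_lt h1)]
      push_cast; ring
    · by_cases h2 : x < p
      · simp [gt_iff_lt, h1, h2]; ring
      · simp [gt_iff_lt, h1, h2]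

-- once p is in the first-dict, the fold never changes its entry
lemma first_stable (xs : List Int) (k : Int) (d1 d2 : PySem.Dict Int Int) (p : Int)
    (hc : d1.contains p = true) :
    (((PySem.List.enumerate xs k).foldl flStep (d1, d2)).1).get? p = d1.get? p := by
  induction xs generalizing k d1 d2 with
  | nil => simp [PySem.List.enumerate_nil]
  | cons x t ih =>
    rw [PySem.List.enumerate_cons, List.foldl_cons]
    by_cases hx : d1.contains x = true
    · rw [show flStep (d1, d2) (k, x) = (d1, d2.insert x (k + 1)) from by simp [flStep, hx]]
      exact ih (k + 1) d1 _ hc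
    · have hxf : d1.contains x = false := by simpa using hx
      have hne : p ≠ x := by
        intro h; rw [h] at hc; rw [hc] at hxf; cases hxf
      rw [show flStep (d1, d2) (k, x) = (d1.insert x k, d2.insert x (k + 1)) from by
        simp [flStep, hxf]]
      rw [ih (k + 1) (d1.insert x k) _ (by simp [PySem.Dict.contains_insert, hc])]
      exact PySem.Dict.get?_insert_of_ne d1 k hne

-- if p never occurs in xs, the fold never touches its entry in the last-dict
lemma last_stable (xs : List Int) (k : Int) (d1 d2 : PySem.Dict Int Int) (p : Int)
    (hp : p ∉ xs) :
    (((PySem.List.enumerate xs k).foldl flStep (d1, d2)).2).get? p = d2.get? p := by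
  induction xs generalizing k d1 d2 with
  | nil => simp [PySem.List.enumerate_nil]
  | cons x t ih =>
    rw [PySem.List.enumerate_cons, List.foldl_cons]
    have hne : p ≠ x := fun h => hp (h ▸ List.mem_cons_self)
    have hpt : p ∉ t := fun h => hp (List.mem_cons_of_mem _ h)
    rw [← Prod.mk.eta (p := flStep (d1, d2) (k, x)),
      ih (k + 1) (flStep (d1, d2) (k, x)).1 (flStep (d1, d2) (k, x)).2 hpt]
    have : (flStep (d1, d2) (k, x)).2 = d2.insert x (k + 1) := by simp [flStep]
    rw [this]
    exact PySem.Dict.get?_insert_of_ne d2 (k + 1) hne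

-- first-dict lookup = start index + (#elements < p), on a sorted list containing p
lemma first_lookup (xs : List Int) (k : Int) (d1 d2 : PySem.Dict Int Int) (p : Int)
    (hs : xs.Pairwise (· ≤ ·)) (hp : p ∈ xs) (hc : d1.contains p = false) :
    (((PySem.List.enumerate xs k).foldl flStep (d1, d2)).1).getD p 0
      = k + (xs.countP (fun q => q < p) : Int) := by
  induction xs generalizing k d1 d2 with
  | nil => cases hp
  | cons x t ih =>
    have hx : ∀ y ∈ t, x ≤ y := fun y hy => (List.pairwise_cons.mp hs).1 y hy
    have ht : t.Pairwise (· ≤ ·) := (List.pairwise_cons.mp hs).2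
    rw [PySem.List.enumerate_cons, List.foldl_cons]
    by_cases hpx : p = x
    · subst hpx
      rw [show flStep (d1, d2) (k, p) = (d1.insert p k, d2.insert p (k + 1)) from by
        simp [flStep, hc]]
      rw [PySem.Dict.getD_eq_get?_getD,
        first_stable t (k + 1) (d1.insert p k) (d2.insert p (k + 1)) p
          (PySem.Dict.contains_insert_self d1 p k),
        PySem.Dict.get?_insert_self]
      have hcount : t.countP (fun q => q < p) = 0 :=
        List.countP_eq_zero.mpr (fun q hq => by simp [not_lt.mpr (hx q hq)])
      simp [hcount]
    · have hpt : p ∈ t := by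
        cases hp with
        | head => exact absurd rfl hpx
        | tail _ h => exact h
      have hxp : x < p := lt_of_le_of_ne (hx p hpt) (fun h => hpx h.symm)
      have hc' : ((flStep (d1, d2) (k, x)).1).contains p = false := by
        by_cases hxx : d1.contains x = true
        · simpa [flStep, hxx] using hc
        · have hxf : d1.contains x = false := by simpa using hxx
          simp [flStep, hxf, PySem.Dict.contains_insert, hc,
            (show (p == x) = false by simp [hpx])]
      rw [← Prod.mk.eta (p := flStep (d1, d2) (k, x)),
        ih (k + 1) (flStep (d1, d2) (k, x)).1 (flStep (d1, d2) (k, x)).2 ht hpt hc']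
      simp only [List.countP_cons, (show decide (x < p) = true by simpa using hxp)]
      push_cast; ring
  
-- last-dict lookup = start index + (#elements ≤ p), on a sorted list containing p
lemma last_lookup (xs : List Int) (k : Int) (d1 d2 : PySem.Dict Int Int) (p : Int)
    (hs : xs.Pairwise (· ≤ ·)) (hp : p ∈ xs) :
    (((PySem.List.enumerate xs k).foldl flStep (d1, d2)).2).getD p 0
      = k + (xs.countP (fun q => q ≤ p) : Int) := by
  induction xs generalizing k d1 d2 with
  | nil => cases hp
  | cons x t ih =>
    have hx : ∀ y ∈ t, x ≤ y := fun y hy => (List.pairwise_cons.mp hs).1 y hy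
    have ht : t.Pairwise (· ≤ ·) := (List.pairwise_cons.mp hs).2
    have hxp : x ≤ p := by
      cases hp with
      | head => exact le_refl _
      | tail _ h => exact hx p h
    rw [PySem.List.enumerate_cons, List.foldl_cons]
    by_cases hpt : p ∈ t
    · rw [← Prod.mk.eta (p := flStep (d1, d2) (k, x)),
        ih (k + 1) (flStep (d1, d2) (k, x)).1 (flStep (d1, d2) (k, x)).2 ht hpt]
      simp only [List.countP_cons, (show decide (x ≤ p) = true by simpa using hxp)]
      push_cast; ring
    · have hpx : p = x := by
        cases hp with
        | head => rfl
        | tail _ h => exact absurd h hpt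
      subst hpx
      rw [← Prod.mk.eta (p := flStep (d1, d2) (k, p)), PySem.Dict.getD_eq_get?_getD,
        last_stable t (k + 1) (flStep (d1, d2) (k, p)).1 (flStep (d1, d2) (k, p)).2 p hpt,
        (show (flStep (d1, d2) (k, p)).2 = d2.insert p (k + 1) from by simp [flStep]),
        PySem.Dict.get?_insert_self]
      have hcount : t.countP (fun q => q ≤ p) = 0 :=
        List.countP_eq_zero.mpr (fun q hq => by
          have h1 := hx q hq
          have h2 : ¬ q ≤ p := fun hle => hpt ((le_antisymm hle h1) ▸ hq)
          simp [h2])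
      simp [hcount]

-- B's two dict lookups, rewritten as counts over the ORIGINAL list
lemma fl_getD (positions : List Int) (p : Int) (hp : p ∈ positions) :
    ((flFold positions).1).getD p 0 = (positions.countP (fun q => q < p) : Int)
      ∧ ((flFold positions).2).getD p 0 = (positions.countP (fun q => q ≤ p) : Int) := by
  have hperm : (PySem.List.sorted positions (fun x => x) false).Perm positions :=
    PySem.List.sorted_perm positions (fun x => x) false
  have hsorted : (PySem.List.sorted positions (fun x => x) false).Pairwise (· ≤ ·) := by
    simpa using PySem.List.sorted_pairwise positions (fun x => x)
  have hps : p ∈ PySem.List.sorted positions (fun x => x) false := hperm.mem_iff.mpr hp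
  unfold flFold
  constructor
  · rw [first_lookup _ 0 _ _ p hsorted hps (PySem.Dict.contains_empty p), hperm.countP_eq]
    simp
  · rw [last_lookup _ 0 _ _ p hsorted hps, hperm.countP_eq]
    simp

-- (#q > p) = n − (#q ≤ p), as integers
lemma count_gt_eq (positions : List Int) (p : Int) :
    (positions.countP (fun q => p < q) : Int)
      = (positions.length : Int) - (positions.countP (fun q => q ≤ p) : Int) := by
  have h := List.length_eq_countP_add_countP (fun q => decide (q ≤ p)) (l := positions)
  have hc : positions.countP (fun a => decide ¬(decide (a ≤ p) = true))
      = positions.countP (fun q => decide (p < q)) :=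
    List.countP_congr (fun q _ => by simp [not_le])
  rw [hc] at h
  omega

-- the common shape of the position update, with explicit indexing flattened to zip
lemma pos_update (xs ys : List Int) (hlen : ys.length = xs.length) :
    (PySem.List.enumerate xs).map (fun ip =>
        ip.2 + (PySem.List.pyGet? ys ip.1).getD 0)
      = (xs.zip ys).map (fun pv => pv.1 + pv.2) := by
  apply List.ext_getElem
  · simp [PySem.List.length_enumerate, hlen]
  · intro i h1 h2
    have hix : i < xs.length := by
      simpa [PySem.List.length_enumerate] using h1
    have hiy : i < ys.length := by omega
    simp [PySem.List.getElem_enumerate, List.getElem_zip, PySem.List.pyGet?_natCast,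
      List.getElem?_eq_getElem hiy]

theorem step_eq (positions velocities : List Int)
    (hpre : positions.length = velocities.length) :
    step_single_axis positions velocities = step_single_axis_alt positions velocities := by
  simp only [step_single_axis, step_single_axis_alt]
  have hv : (PySem.List.enumerate velocities).map (fun iv =>
        iv.2 + ((PySem.List.pyGet? (positions.map (fun position =>
          positions.map (fun other_position =>
            if other_position > position then (1 : Int)
            else if other_position < position then (-1 : Int) else 0))) iv.1).getD []).sum)
      = (positions.zip velocities).map (fun pv =>
        pv.2 + ((positions.length : Int) - (flFold positions).2.getD pv.1 0)
          - (flFold positions).1.getD pv.1 0) := by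
    apply List.ext_getElem
    · simp [PySem.List.length_enumerate, hpre]
    · intro i h1 h2
      have hiv : i < velocities.length := by
        simpa [PySem.List.length_enumerate] using h1
      have hip : i < positions.length := by omega
      simp only [List.getElem_map, PySem.List.getElem_enumerate, List.getElem_zip]
      rw [show (0 : Int) + (i : Int) = ((i : Nat) : Int) by simp]
      rw [PySem.List.pyGet?_natCast, List.getElem?_map,
        List.getElem?_eq_getElem hip]
      simp only [Option.map_some, Option.getD_some]
      rw [row_sum]
      obtain ⟨hfst, hlst⟩ := fl_getD positions positions[i] (List.getElem_mem hip)
      rw [hfst, hlst, count_gt_eq]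
      ring
  rw [hv, pos_update positions _ (by simp [hpre])]

-- ===== VERDICT (by name: the statement is the Claim_ definition above) =====
theorem step_single_axis_spec : Claim_equal_step_single_axis := by
  intro positions velocities _ hpre
  unfold Spec_step_single_axis
  exact step_eq positions velocities hpre
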